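-- pv_equiv track=rewrite | github.com/gxwangdi/Practice | Leetcode/849-Maximize-Distance-to-Closest-Person/MaximizeDistancetoClosestPerson_3.py | _maxZeroDistance
-- ===== SOURCE A (Python) =====
-- from typing import List
--
-- def _maxZeroDistance(seats: List[int]) -> int:
--     isB=True
--     res=0
--     count = 0
--     for i in seats:
--         if i == 0:
--             count+=1
--         else:
--             if isB:
--                 res = max(res, count*2)
--             else:
--                 res = max(res, count)
--             isB = False
--             count = 0
--     if count!= 0:
--         res = max(res, count*2)
--     return res
-- ===== SOURCE B (Python) =====
-- from typing import List
--
-- def _maxZeroDistance(seats: List[int]) -> int: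
--     people = [i for i, v in enumerate(seats) if v != 0]
--     if not people:
--         return len(seats) * 2
--     res = max(people[0] * 2, (len(seats) - 1 - people[-1]) * 2)
--     for p, q in zip(people, people[1:]):
--         res = max(res, q - p - 1)
--     return res
-- ===== Notes on version B (the rewrite author's own statement) =====
-- stated objective: alternative
-- what changed: B replaces A's one-pass flag/counter scan by an index-based decomposition: collect the occupied positions once, take the doubled boundary gaps from the first/last position, and scan adjacent position pairs for interior gaps.
import Mathlib
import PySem

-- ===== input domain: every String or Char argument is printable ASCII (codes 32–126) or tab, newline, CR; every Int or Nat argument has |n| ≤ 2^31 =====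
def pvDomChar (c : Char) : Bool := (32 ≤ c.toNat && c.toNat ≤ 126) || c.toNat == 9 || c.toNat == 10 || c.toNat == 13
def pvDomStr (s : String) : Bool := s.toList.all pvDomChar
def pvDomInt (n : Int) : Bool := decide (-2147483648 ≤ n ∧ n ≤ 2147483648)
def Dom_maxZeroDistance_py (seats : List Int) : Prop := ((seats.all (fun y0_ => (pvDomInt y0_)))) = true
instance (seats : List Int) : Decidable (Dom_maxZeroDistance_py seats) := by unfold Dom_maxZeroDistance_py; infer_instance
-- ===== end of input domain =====

-- B reformulates A's flag/counter scan as: occupied positions list, doubled boundary gaps, interior adjacent gaps (alternative decomposition, same cost).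

-- ===== PORT A =====
def aStep (st : Bool × Int × Int) (i : Int) : Bool × Int × Int :=
  if i == 0 then (st.1, st.2.1, st.2.2 + 1)
  else (false, if st.1 then max st.2.1 (st.2.2 * 2) else max st.2.1 st.2.2, 0)

def maxZeroDistance_py (seats : List Int) : Int :=
  let s := seats.foldl aStep (true, 0, 0)
  if s.2.2 ≠ 0 then max s.2.1 (s.2.2 * 2) else s.2.1

-- ===== PORT B =====
def bGaps (res : Int) (people : List Int) : Int :=
  (people.zip people.tail).foldl (fun r pq => max r (pq.2 - pq.1 - 1)) res

def maxZeroDistance_py_alt (seats : List Int) : Int :=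
  let people := ((PySem.List.enumerate seats).filter (fun p => p.2 != 0)).map (fun p => p.1)
  match people with
  | [] => (seats.length : Int) * 2
  | p :: rest =>
    bGaps (max (p * 2) (((seats.length : Int) - 1 - (p :: rest).getLast (List.cons_ne_nil _ _)) * 2)) (p :: rest)

-- ===== PRECONDITION & SPEC =====
def Spec_maxZeroDistance_py (seats : List Int) (out : Int) : Prop := out = maxZeroDistance_py_alt seats
instance (seats : List Int) (out : Int) : Decidable (Spec_maxZeroDistance_py seats out) := by unfold Spec_maxZeroDistance_py; infer_instance

-- ===== CLAIM (what is proved, stated in full; the proofs are below) =====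
def Claim_equal_maxZeroDistance_py : Prop := ∀ (seats : List Int), Dom_maxZeroDistance_py seats → Spec_maxZeroDistance_py seats (maxZeroDistance_py seats)

-- ===== LEMMAS AND PROOFS =====

-- indices (from offset j) of the nonzero entries
def peopleFrom (j : Int) : List Int → List Int
  | [] => []
  | x :: t => if x = 0 then peopleFrom (j + 1) t else j :: peopleFrom (j + 1) t

theorem peopleFrom_shift (t : List Int) : ∀ j : Int, peopleFrom (j + 1) t = (peopleFrom j t).map (· + 1) := by
  induction t with
  | nil => intro j; simp [peopleFrom]
  | cons x t ih =>
    intro j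
    by_cases hx : x = 0 <;> simp [peopleFrom, hx, ih]

theorem people_port_eq (seats : List Int) : ∀ s : Int,
    ((PySem.List.enumerate seats s).filter (fun p => p.2 != 0)).map (fun p => p.1) = peopleFrom s seats := by
  induction seats with
  | nil => intro s; simp [PySem.List.enumerate_nil, peopleFrom]
  | cons x t ih =>
    intro s
    by_cases hx : x = 0 <;>
      simp [PySem.List.enumerate_cons, hx, peopleFrom, ih]

theorem bGaps_singleton (res a : Int) : bGaps res [a] = res := by simp [bGaps]

theorem bGaps_cons_cons (res a b : Int) (t : List Int) :
    bGaps res (a :: b :: t) = bGaps (max res (b - a - 1)) (b :: t) := by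
  simp [bGaps]

theorem bGaps_map_add_one (ps : List Int) : ∀ res : Int, bGaps res (ps.map (· + 1)) = bGaps res ps := by
  induction ps with
  | nil => intro res; simp [bGaps]
  | cons p t ih =>
    intro res
    cases t with
    | nil => simp [bGaps]
    | cons q t' =>
      have h1 : (p :: q :: t').map (· + 1) = (p + 1) :: (q :: t').map (· + 1) := by simp
      rw [h1]
      have h2 : (q :: t').map (· + 1) = (q + 1) :: t'.map (· + 1) := by simp
      rw [h2, bGaps_cons_cons, bGaps_cons_cons, ← h2, ih]
      congr 1
      ring_nf

theorem bGaps_max_right (ps : List Int) : ∀ a b : Int, bGaps (max a b) ps = max (bGaps a ps) b := by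
  induction ps with
  | nil => intro a b; simp [bGaps]
  | cons p t ih =>
    intro a b
    cases t with
    | nil => simp [bGaps]
    | cons q t' =>
      rw [bGaps_cons_cons, bGaps_cons_cons]
      rw [show max (max a b) (q - p - 1) = max (max a (q - p - 1)) b by
        rw [max_comm a b, max_assoc, max_comm b _]]
      exact ih _ _

theorem getLast_cons_eq_getLastD (p : Int) (l : List Int) (h : p :: l ≠ []) :
    (p :: l).getLast h = (p :: l).getLastD 0 := by
  induction l generalizing p with
  | nil => simp
  | cons q l' ih =>
    rw [List.getLast_cons (List.cons_ne_nil _ _), ih q (List.cons_ne_nil _ _),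
      List.getLastD_cons, List.getLastD_cons, List.getLastD_cons]

theorem getLastD_map_add_one (l : List Int) : ∀ d : Int,
    (l.map (· + 1)).getLastD (d + 1) = l.getLastD d + 1 := by
  induction l with
  | nil => intro d; simp
  | cons q l' ih =>
    intro d
    rw [List.map_cons, List.getLastD_cons, List.getLastD_cons, ih q]

theorem getLastD_map_cons (p : Int) (rest : List Int) :
    ((p :: rest).map (· + 1)).getLastD 0 = (p :: rest).getLastD 0 + 1 := by
  rw [List.map_cons, List.getLastD_cons, List.getLastD_cons, getLastD_map_add_one]

def finA (s : Bool × Int × Int) : Int := if s.2.2 ≠ 0 then max s.2.1 (s.2.2 * 2) else s.2.1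

def bTail (res count : Int) (t : List Int) : Int :=
  match peopleFrom 0 t with
  | [] => max res ((count + t.length) * 2)
  | p :: rest =>
    max (bGaps (max res (count + p)) (p :: rest))
      (((t.length : Int) - 1 - (p :: rest).getLastD 0) * 2)

def bHead (count : Int) (t : List Int) : Int :=
  match peopleFrom 0 t with
  | [] => (count + t.length) * 2
  | p :: rest =>
    max (bGaps ((count + p) * 2) (p :: rest))
      (((t.length : Int) - 1 - (p :: rest).getLastD 0) * 2)

theorem peopleFrom_zero_cons_zero (t : List Int) :
    peopleFrom 0 (0 :: t) = (peopleFrom 0 t).map (· + 1) := by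
  rw [show peopleFrom 0 (0 :: t) = peopleFrom (0 + 1) t by simp [peopleFrom], peopleFrom_shift]

theorem peopleFrom_zero_cons_ne (x : Int) (hx : x ≠ 0) (t : List Int) :
    peopleFrom 0 (x :: t) = 0 :: (peopleFrom 0 t).map (· + 1) := by
  rw [show peopleFrom 0 (x :: t) = 0 :: peopleFrom (0 + 1) t by simp [peopleFrom, hx], peopleFrom_shift]

theorem tail_phase (t : List Int) : ∀ res count : Int, 0 ≤ res → 0 ≤ count →
    finA (t.foldl aStep (false, res, count)) = bTail res count t := by
  induction t with
  | nil =>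
    intro res count hr hc
    simp only [List.foldl_nil, finA, bTail, peopleFrom, List.length_nil]
    split_ifs with h <;> omega
  | cons x t ih =>
    intro res count hr hc
    by_cases hx : x = 0
    · subst hx
      have hstep : aStep (false, res, count) 0 = (false, res, count + 1) := by
        simp [aStep]
      rw [List.foldl_cons, hstep, ih res (count + 1) hr (by omega)]
      simp only [bTail, peopleFrom_zero_cons_zero]
      cases hp : peopleFrom 0 t with
      | nil =>
        simp only [List.map_nil, List.length_cons]
        congr 1
        push_cast; ring
      | cons p rest =>
        have hm : (p :: rest).map (· + 1) = (p + 1) :: rest.map (· + 1) := by simp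
        simp only [hm]
        rw [← hm, bGaps_map_add_one, getLastD_map_cons]
        congr 1
        · congr 1
          omega
        · simp only [List.length_cons]; push_cast; ring
    · have hstep : aStep (false, res, count) x = (false, max res count, 0) := by
        simp [aStep, hx]
      rw [List.foldl_cons, hstep, ih (max res count) 0 (le_max_of_le_left hr) le_rfl]
      simp only [bTail, peopleFrom_zero_cons_ne x hx]
      cases hp : peopleFrom 0 t with
      | nil =>
        simp only [List.map_nil, bGaps_singleton, List.length_cons, List.getLastD_cons,
          List.getLastD_nil]
        congr 1
        · omega
        · push_cast; ring
      | cons p rest =>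
        have hm : (p :: rest).map (· + 1) = (p + 1) :: rest.map (· + 1) := by simp
        simp only [hm]
        rw [bGaps_cons_cons, ← hm, bGaps_map_add_one,
          show ((0 : Int) :: (p :: rest).map (· + 1)).getLastD 0 = ((p :: rest).map (· + 1)).getLastD 0
            from List.getLastD_cons .., getLastD_map_cons]
        congr 1
        · congr 1
          omega
        · simp only [List.length_cons]; push_cast; ring

theorem head_phase (t : List Int) : ∀ count : Int, 0 ≤ count →
    finA (t.foldl aStep (true, 0, count)) = bHead count t := by
  induction t with
  | nil =>
    intro count hc
    simp only [List.foldl_nil, finA, bHead, peopleFrom, List.length_nil]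
    split_ifs with h <;> omega
  | cons x t ih =>
    intro count hc
    by_cases hx : x = 0
    · subst hx
      have hstep : aStep (true, 0, count) 0 = (true, 0, count + 1) := by
        simp [aStep]
      rw [List.foldl_cons, hstep, ih (count + 1) (by omega)]
      simp only [bHead, peopleFrom_zero_cons_zero]
      cases hp : peopleFrom 0 t with
      | nil =>
        simp only [List.map_nil, List.length_cons]
        push_cast; ring
      | cons p rest =>
        have hm : (p :: rest).map (· + 1) = (p + 1) :: rest.map (· + 1) := by simp
        simp only [hm]
        rw [← hm, bGaps_map_add_one, getLastD_map_cons]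
        congr 1
        · congr 1
          omega
        · simp only [List.length_cons]; push_cast; ring
    · have hstep : aStep (true, 0, count) x = (false, max 0 (count * 2), 0) := by
        simp [aStep, hx]
      rw [List.foldl_cons, hstep,
        tail_phase t (max 0 (count * 2)) 0 (le_max_left _ _) le_rfl]
      rw [max_eq_right (by omega : (0 : Int) ≤ count * 2)]
      simp only [bTail, bHead, peopleFrom_zero_cons_ne x hx]
      cases hp : peopleFrom 0 t with
      | nil =>
        simp only [List.map_nil, bGaps_singleton, List.length_cons, List.getLastD_cons,
          List.getLastD_nil]
        congr 1
        · ring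
        · push_cast; ring
      | cons p rest =>
        have hm : (p :: rest).map (· + 1) = (p + 1) :: rest.map (· + 1) := by simp
        simp only [hm]
        rw [bGaps_cons_cons, ← hm, bGaps_map_add_one,
          show ((0 : Int) :: (p :: rest).map (· + 1)).getLastD 0 = ((p :: rest).map (· + 1)).getLastD 0
            from List.getLastD_cons .., getLastD_map_cons]
        congr 1
        · congr 1
          omega
        · simp only [List.length_cons]; push_cast; ring

theorem maxZeroDistance_py_eq_bHead (seats : List Int) : maxZeroDistance_py seats = bHead 0 seats := by
  have := head_phase seats 0 le_rfl
  simpa [maxZeroDistance_py, finA] using this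

theorem alt_eq_bHead (seats : List Int) : maxZeroDistance_py_alt seats = bHead 0 seats := by
  unfold maxZeroDistance_py_alt bHead
  rw [people_port_eq seats 0]
  cases hp : peopleFrom 0 seats with
  | nil => simp
  | cons p rest =>
    simp only []
    rw [getLast_cons_eq_getLastD, bGaps_max_right]
    congr 2
    ring

-- ===== VERDICT (by name: the statement is the Claim_ definition above) =====
theorem maxZeroDistance_py_spec : Claim_equal_maxZeroDistance_py := by
  intro seats _
  unfold Spec_maxZeroDistance_py
  rw [maxZeroDistance_py_eq_bHead, alt_eq_bHead]
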